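-- pv_equiv track=rewrite | github.com/TommyFurgi/introduction-to-computer-science | zestaw 2/2.20.py | common_digit
-- ===== SOURCE A (Python) =====
-- def common_digit(x,y,s):
--     D=[False]*s
--     while x!=0:
--         d=x%s
--         D[d]=True
--         x//=s
--     while y!=0:
--         if D[y%s]:
--             return True
--         y//=s
--     return False
-- ===== SOURCE B (Python) =====
-- def common_digit(x, y, s):
--     while y != 0:
--         dy = y % s
--         t = x
--         while t != 0:
--             if t % s == dy:
--                 return True
--             t //= s
--         y //= s
--     return False
-- ===== Notes on version B (the rewrite author's own statement) =====
-- stated objective: faster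
-- what changed: Replaces A's size-s boolean table filled from x and then scanned against y's digits by a container-free brute-force double loop: for each base-s digit of y, rescan x's digit chain directly and return on the first match; B never allocates or zeroes the O(s) table, so its cost is independent of the base s.
-- outside the precondition, e.g. on common_digit(5, 3, 1): A does not finish within the time limit, B returns True; on common_digit(7, -3, 10): A returns True, B returns True
import Mathlib
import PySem

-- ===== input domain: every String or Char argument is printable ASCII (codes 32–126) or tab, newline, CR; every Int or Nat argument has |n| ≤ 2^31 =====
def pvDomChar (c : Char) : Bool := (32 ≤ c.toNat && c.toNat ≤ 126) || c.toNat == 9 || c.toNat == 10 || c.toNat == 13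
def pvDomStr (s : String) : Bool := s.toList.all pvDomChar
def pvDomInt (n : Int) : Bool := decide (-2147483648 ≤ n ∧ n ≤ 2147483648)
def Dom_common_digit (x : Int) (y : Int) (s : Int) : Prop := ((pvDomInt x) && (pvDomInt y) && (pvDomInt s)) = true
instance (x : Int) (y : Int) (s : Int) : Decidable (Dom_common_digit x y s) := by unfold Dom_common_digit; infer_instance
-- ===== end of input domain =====

-- B replaces A's size-s boolean table (filled from x, then scanned with early return on y's
-- digits) by a container-free brute-force double loop: for each base-s digit of y, rescan
-- x's digit chain directly, with no O(s) table allocation (objective: faster for large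
-- bases, measured). Equivalence is claimed on Pre_ below.

-- termination helper for the loop ports: the loop variable strictly shrinks
theorem pvFloorLt (x s : Int) (h : 2 ≤ s ∧ 0 < x) : (PySem.Int.floordiv x s).toNat < x.toNat := by
  obtain ⟨hs, hx⟩ := h
  have h1 : PySem.Int.floordiv x s < x :=
    (PySem.Int.floordiv_lt_iff_lt_mul (by omega)).mpr (by nlinarith)
  have h2 : (0 : Int) ≤ PySem.Int.floordiv x s :=
    (PySem.Int.le_floordiv_iff_mul_le (by omega)).mpr (by nlinarith)
  omega

-- ===== PORT A =====
-- first while-loop of A: while x != 0: D[x % s] = True; x //= s .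
-- the '2 ≤ s ∧ 0 < x' test is a TOTALITY GUARD only: outside it (and with x ≠ 0) the
-- Python loop diverges or raises, and Pre_ excludes those inputs.
def fillLoopA (s : Int) (x : Int) (D : List Bool) : List Bool :=
  if x = 0 then D
  else if h : 2 ≤ s ∧ 0 < x then
    fillLoopA s (PySem.Int.floordiv x s) (PySem.List.pySetD D (PySem.Int.mod x s) true)
  else D
termination_by x.toNat
decreasing_by exact pvFloorLt x s h

-- second while-loop of A: while y != 0: if D[y % s]: return True; y //= s  (same guard)
def scanLoopA (s : Int) (y : Int) (D : List Bool) : Bool :=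
  if y = 0 then false
  else if h : 2 ≤ s ∧ 0 < y then
    if PySem.List.pyGetD D (PySem.Int.mod y s) false then true
    else scanLoopA s (PySem.Int.floordiv y s) D
  else false
termination_by y.toNat
decreasing_by exact pvFloorLt y s h

def common_digit (x : Int) (y : Int) (s : Int) : Bool :=
  scanLoopA s y (fillLoopA s x (List.replicate s.toNat false))

-- ===== PORT B =====
-- B's inner loop: t = x; while t != 0: if t % s == dy: return True; t //= s
-- (same '2 ≤ s ∧ 0 < t' totality guard; outside it and with t ≠ 0 the Python loop
-- diverges or raises, and Pre_ excludes those inputs)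
def innerB (s : Int) (t : Int) (dy : Int) : Bool :=
  if t = 0 then false
  else if h : 2 ≤ s ∧ 0 < t then
    if PySem.Int.mod t s = dy then true
    else innerB s (PySem.Int.floordiv t s) dy
  else false
termination_by t.toNat
decreasing_by exact pvFloorLt t s h

-- B's outer loop: while y != 0: dy = y % s; <inner scan of x>; y //= s
def outerB (s : Int) (x : Int) (y : Int) : Bool :=
  if y = 0 then false
  else if h : 2 ≤ s ∧ 0 < y then
    if innerB s x (PySem.Int.mod y s) then true
    else outerB s x (PySem.Int.floordiv y s)
  else false
termination_by y.toNat
decreasing_by exact pvFloorLt y s h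

def common_digit_alt (x : Int) (y : Int) (s : Int) : Bool := outerB s x y

-- ===== PRECONDITION & SPEC =====
-- Pre_ excludes the inputs on which Python's A does not return normally — s ≤ 0 raises
-- (ZeroDivisionError / IndexError), s = 1 diverges, and a negative x or y makes floor
-- division get stuck at -1 so A diverges — except the x = y = 0 corner (both loops are
-- skipped for any s, kept inside Pre_) and the corner of a negative y whose scan hits a
-- digit of x and returns True before diverging, which Pre_ excludes only because A's
-- termination there is accidental (B returns the same True there).
def Pre_common_digit (x : Int) (y : Int) (s : Int) : Prop :=
  (2 ≤ s ∧ 0 ≤ x ∧ 0 ≤ y) ∨ (x = 0 ∧ y = 0)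
instance (x : Int) (y : Int) (s : Int) : Decidable (Pre_common_digit x y s) := by
  unfold Pre_common_digit; infer_instance

def pvWitness_common_digit : Int × Int × Int := (25, 57, 10)

def Spec_common_digit (x : Int) (y : Int) (s : Int) (out : Bool) : Prop := out = common_digit_alt x y s
instance (x : Int) (y : Int) (s : Int) (out : Bool) : Decidable (Spec_common_digit x y s out) := by unfold Spec_common_digit; infer_instance

-- ===== CLAIM (what is proved, stated in full; the proofs are below) =====
def Claim_equal_common_digit : Prop := ∀ (x : Int) (y : Int) (s : Int), Dom_common_digit x y s → Pre_common_digit x y s → Spec_common_digit x y s (common_digit x y s)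

-- ===== LEMMAS AND PROOFS =====

-- proof-only spec helper: the base-s digit chain of n, as a list
def digs (s : Int) (n : Int) : List Int :=
  if n = 0 then []
  else if h : 2 ≤ s ∧ 0 < n then
    PySem.Int.mod n s :: digs s (PySem.Int.floordiv n s)
  else []
termination_by n.toNat
decreasing_by exact pvFloorLt n s h

theorem digs_zero (s : Int) : digs s 0 = [] := by rw [digs]; simp

theorem digs_step (s n : Int) (hn : n ≠ 0) (h : 2 ≤ s ∧ 0 < n) :
    digs s n = PySem.Int.mod n s :: digs s (PySem.Int.floordiv n s) := by
  rw [digs]; simp [hn, h]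

theorem floordiv_nonneg' (n s : Int) (hs : 2 ≤ s) (hn : 0 < n) :
    (0 : Int) ≤ PySem.Int.floordiv n s :=
  (PySem.Int.le_floordiv_iff_mul_le (by omega)).mpr (by nlinarith)

-- digits lie in [0, s)
theorem digs_bounds (s n : Int) : ∀ d ∈ digs s n, 0 ≤ d ∧ d < s := by
  by_cases hn : n = 0
  · subst hn; rw [digs_zero]; simp
  · by_cases h : 2 ≤ s ∧ 0 < n
    · rw [digs_step s n hn h]
      intro d hd
      rcases List.mem_cons.mp hd with hd | hd
      · subst hd
        exact ⟨PySem.Int.mod_nonneg n (by omega), PySem.Int.mod_lt n (by omega)⟩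
      · exact digs_bounds s (PySem.Int.floordiv n s) d hd
    · rw [digs]; simp [hn, h]
termination_by n.toNat
decreasing_by exact pvFloorLt n s h

-- B's inner scan is membership in x's digit chain
theorem innerB_iff (s t dy : Int) : innerB s t dy = true ↔ dy ∈ digs s t := by
  by_cases ht : t = 0
  · subst ht; rw [innerB, digs_zero]; simp
  · by_cases h : 2 ≤ s ∧ 0 < t
    · rw [innerB, digs_step s t ht h]
      simp only [ht, if_false, dif_pos h, List.mem_cons]
      by_cases hm : PySem.Int.mod t s = dy
      · simp [hm]
      · simp only [hm, if_false]
        rw [innerB_iff s (PySem.Int.floordiv t s) dy]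
        constructor
        · exact Or.inr
        · rintro (hd | hd)
          · exact absurd hd.symm hm
          · exact hd
    · rw [innerB, digs]; simp [ht, h]
termination_by t.toNat
decreasing_by exact pvFloorLt t s h

-- B's outer loop: some digit of y is a digit of x
theorem outerB_iff (s x y : Int) :
    outerB s x y = true ↔ ∃ d ∈ digs s y, d ∈ digs s x := by
  by_cases hy : y = 0
  · subst hy; rw [outerB, digs_zero]; simp
  · by_cases h : 2 ≤ s ∧ 0 < y
    · rw [outerB, digs_step s y hy h]
      simp only [hy, if_false, dif_pos h]
      by_cases hhit : innerB s x (PySem.Int.mod y s) = true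
      · simp only [hhit, if_true, true_iff]
        exact ⟨PySem.Int.mod y s, List.mem_cons_self, (innerB_iff _ _ _).mp hhit⟩
      · simp only [hhit, Bool.false_eq_true, if_false]
        rw [outerB_iff s x (PySem.Int.floordiv y s)]
        constructor
        · rintro ⟨d, hd, hdx⟩; exact ⟨d, List.mem_cons_of_mem _ hd, hdx⟩
        · rintro ⟨d, hd, hdx⟩
          rcases List.mem_cons.mp hd with hd | hd
          · exact absurd ((innerB_iff _ _ _).mpr (hd ▸ hdx)) hhit
          · exact ⟨d, hd, hdx⟩
    · rw [outerB, digs]; simp [hy, h]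
termination_by y.toNat
decreasing_by exact pvFloorLt y s h

-- the array filled by A's first loop reads back as membership in x's digit chain
theorem fillLoopA_getD (s x : Int) (D : List Bool) (k : Nat) (hs : 2 ≤ s) (hx : 0 ≤ x)
    (hD : D.length = s.toNat) :
    ((fillLoopA s x D).getD k false = true
      ↔ (D.getD k false = true ∨ (k : Int) ∈ digs s x)) := by
  by_cases hx0 : x = 0
  · subst hx0; rw [fillLoopA, digs_zero]; simp
  · have h : 2 ≤ s ∧ 0 < x := ⟨hs, by omega⟩
    have hm0 : (0 : Int) ≤ PySem.Int.mod x s := PySem.Int.mod_nonneg x (by omega)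
    have hms : PySem.Int.mod x s < s := PySem.Int.mod_lt x (by omega)
    have hx' : (0 : Int) ≤ PySem.Int.floordiv x s := floordiv_nonneg' x s hs (by omega)
    rw [show fillLoopA s x D
        = fillLoopA s (PySem.Int.floordiv x s) (PySem.List.pySetD D (PySem.Int.mod x s) true)
        from by rw [fillLoopA]; simp [hx0, h],
      digs_step s x hx0 h]
    rw [fillLoopA_getD s (PySem.Int.floordiv x s)
        (PySem.List.pySetD D (PySem.Int.mod x s) true) k hs hx'
        (by rw [PySem.List.length_pySetD]; exact hD)]
    rw [PySem.List.pySetD_of_nonneg D true hm0]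
    have hlen : (PySem.Int.mod x s).toNat < D.length := by omega
    by_cases hk : k = (PySem.Int.mod x s).toNat
    · subst hk
      have hset : (D.set (PySem.Int.mod x s).toNat true).getD (PySem.Int.mod x s).toNat false
          = true := by
        simp [List.getD, List.getElem?_set_self hlen]
      rw [hset]
      have : (((PySem.Int.mod x s).toNat : Nat) : Int) = PySem.Int.mod x s := by omega
      simp [this]
    · have hset : (D.set (PySem.Int.mod x s).toNat true).getD k false = D.getD k false := by
        simp [List.getD, List.getElem?_set_ne (fun hh => hk hh.symm)]
      rw [hset]
      have hne : ((k : Nat) : Int) ≠ PySem.Int.mod x s := by omega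
      simp only [List.mem_cons]
      tauto
termination_by x.toNat
decreasing_by exact pvFloorLt x s h

-- A's second loop returns true iff some digit of y is set in D
theorem scanLoopA_iff (s y : Int) (D : List Bool) (hs : 2 ≤ s) (hy : 0 ≤ y) :
    (scanLoopA s y D = true
      ↔ ∃ d ∈ digs s y, PySem.List.pyGetD D d false = true) := by
  by_cases hy0 : y = 0
  · subst hy0; rw [scanLoopA, digs_zero]; simp
  · have h : 2 ≤ s ∧ 0 < y := ⟨hs, by omega⟩
    have hy' : (0 : Int) ≤ PySem.Int.floordiv y s := floordiv_nonneg' y s hs (by omega)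
    rw [scanLoopA, digs_step s y hy0 h]
    simp only [hy0, if_false, dif_pos h]
    by_cases hhit : PySem.List.pyGetD D (PySem.Int.mod y s) false = true
    · simp only [hhit, if_true, true_iff]
      exact ⟨PySem.Int.mod y s, List.mem_cons_self, hhit⟩
    · simp only [hhit, Bool.false_eq_true, if_false]
      rw [scanLoopA_iff s (PySem.Int.floordiv y s) D hs hy']
      constructor
      · rintro ⟨d, hd, hD⟩; exact ⟨d, List.mem_cons_of_mem _ hd, hD⟩
      · rintro ⟨d, hd, hD⟩
        rcases List.mem_cons.mp hd with hd | hd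
        · exact absurd (hd ▸ hD) hhit
        · exact ⟨d, hd, hD⟩
termination_by y.toNat
decreasing_by exact pvFloorLt y s h

theorem getD_replicate_false (k i : Nat) : (List.replicate k false).getD i false = false := by
  simp [List.getD, List.getElem?_replicate]
  split <;> rfl

-- ===== VERDICT (by name: the statement is the Claim_ definition above) =====
theorem common_digit_spec : Claim_equal_common_digit := by
  intro x y s _ hpre
  rcases hpre with ⟨hs, hx, hy⟩ | ⟨hx0, hy0⟩
  case inr =>
    subst hx0; subst hy0
    unfold Spec_common_digit common_digit common_digit_alt
    rw [scanLoopA, outerB]; simp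
  unfold Spec_common_digit common_digit common_digit_alt
  rw [Bool.eq_iff_iff, scanLoopA_iff s y _ hs hy, outerB_iff]
  constructor
  · rintro ⟨d, hd, hD⟩
    refine ⟨d, hd, ?_⟩
    have hdb := digs_bounds s y d hd
    have hdnn : d = ((d.toNat : Nat) : Int) := by omega
    rw [hdnn, PySem.List.pyGetD_natCast,
      fillLoopA_getD s x _ d.toNat hs hx (by simp)] at hD
    rcases hD with hD | hD
    · rw [getD_replicate_false] at hD; cases hD
    · exact hdnn ▸ hD
  · rintro ⟨d, hd, hdx⟩
    refine ⟨d, hd, ?_⟩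
    have hdb := digs_bounds s x d hdx
    have hdnn : d = ((d.toNat : Nat) : Int) := by omega
    rw [hdnn, PySem.List.pyGetD_natCast,
      fillLoopA_getD s x _ d.toNat hs hx (by simp)]
    right
    exact hdnn ▸ hdx
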